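-- pv_equiv track=rewrite | github.com/tajtiattila/learn-python | prime.py | smallest_true_divisor
-- ===== SOURCE A (Python) =====
-- def smallest_true_divisor(n):
--     if n < 2:
--         return 1
--     i = 2
--     while i*i <= n:
--         if n%i == 0:
--             return i
--         i += 1
--     return 1
-- ===== SOURCE B (Python) =====
-- def smallest_true_divisor(n):
--     if n < 2:
--         return 1
--     limit = 1
--     while limit * limit <= n:
--         limit += limit
--     is_comp = [False] * limit
--     p = 2
--     while p < limit:
--         if not is_comp[p]:
--             if n % p == 0:
--                 return p
--             m = p * p
--             while m < limit:
--                 is_comp[m] = True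
--                 m += p
--         p += 1
--     return 1
-- ===== Notes on version B (the rewrite author's own statement) =====
-- stated objective: alternative
-- what changed: Replaces A's direct trial division (testing n % i for every candidate whose square is at most n) by a Sieve of Eratosthenes: it doubles a power-of-two limit past sqrt(n), sieves composites out of the candidates below the limit, and returns the first unmarked (hence prime) candidate that divides n, testing divisibility only at primes; correct because the smallest true divisor is prime and lies below the limit.
import Mathlib
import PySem

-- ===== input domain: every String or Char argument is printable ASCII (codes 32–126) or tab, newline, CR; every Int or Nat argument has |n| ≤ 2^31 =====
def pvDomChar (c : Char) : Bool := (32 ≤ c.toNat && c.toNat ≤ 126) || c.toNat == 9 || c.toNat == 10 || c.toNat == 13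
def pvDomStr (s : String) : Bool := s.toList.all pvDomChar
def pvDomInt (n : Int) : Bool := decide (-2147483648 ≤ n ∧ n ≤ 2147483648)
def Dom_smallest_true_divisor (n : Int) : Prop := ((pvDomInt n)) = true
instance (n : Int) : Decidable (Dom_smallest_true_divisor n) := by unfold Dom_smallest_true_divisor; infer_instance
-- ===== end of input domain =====

-- B replaces A's trial division by a Sieve of Eratosthenes up to a limit past sqrt(n),
-- returning the first unmarked candidate dividing n (alternative algorithm, similar cost).

-- ===== PORT A =====
-- A's 'while i*i <= n' loop, step for step
def stdWhile (n i : Int) : Int :=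
  if _h : i * i ≤ n then
    if PySem.Int.mod n i = 0 then i else stdWhile n (i + 1)
  else 1
termination_by (n + 1 - i).toNat
decreasing_by
  have hin : i ≤ n := by nlinarith [sq_nonneg (i - 1)]
  omega

def smallest_true_divisor (n : Int) : Int :=
  if n < 2 then 1 else stdWhile n 2

-- ===== PORT B =====
-- B's 'while limit*limit <= n: limit += limit' loop (the '1 ≤ l' conjunct only makes
-- the recursion total; in B limit starts at 1 and only grows)
def doubleLimit (n l : Int) : Int :=
  if _h : 1 ≤ l ∧ l * l ≤ n then doubleLimit n (l + l) else l
termination_by (n + 1 - l).toNat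
decreasing_by
  have : l ≤ n := by nlinarith
  omega

-- B's inner marking loop 'while m < limit: is_comp[m] = True; m += p' (the '1 ≤ p'
-- conjunct only makes the recursion total; in B p ≥ 2)
def markFrom (limit p : Int) (comp : List Bool) (m : Int) : List Bool :=
  if _h : 1 ≤ p ∧ m < limit then markFrom limit p (comp.set m.toNat true) (m + p) else comp
termination_by (limit - m).toNat
decreasing_by omega

-- B's outer 'while p < limit' scan, step for step
def sieveLoop (n limit : Int) (comp : List Bool) (p : Int) : Int :=
  if _h : p < limit then
    if comp.getD p.toNat false = false then
      if PySem.Int.mod n p = 0 then p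
      else sieveLoop n limit (markFrom limit p comp (p * p)) (p + 1)
    else sieveLoop n limit comp (p + 1)
  else 1
termination_by (limit - p).toNat
decreasing_by all_goals omega

def smallest_true_divisor_alt (n : Int) : Int :=
  if n < 2 then 1
  else
    let limit := doubleLimit n 1
    sieveLoop n limit (List.replicate limit.toNat false) 2

-- ===== PRECONDITION & SPEC =====
def Spec_smallest_true_divisor (n : Int) (out : Int) : Prop := out = smallest_true_divisor_alt n
instance (n : Int) (out : Int) : Decidable (Spec_smallest_true_divisor n out) := by unfold Spec_smallest_true_divisor; infer_instance

-- ===== CLAIM (what is proved, stated in full; the proofs are below) =====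
def Claim_equal_smallest_true_divisor : Prop := ∀ (n : Int), Dom_smallest_true_divisor n → Spec_smallest_true_divisor n (smallest_true_divisor n)

-- ===== LEMMAS AND PROOFS =====

-- 'comp is honest': a marked cell holds a composite number
def SieveInv (comp : List Bool) : Prop :=
  ∀ k : Nat, comp.getD k false = true → ∃ d : Int, 2 ≤ d ∧ d < (k : Int) ∧ d ∣ (k : Int)

theorem getD_set_true {comp : List Bool} {i k : Nat}
    (h : (comp.set i true).getD k false = true) :
    comp.getD k false = true ∨ k = i := by
  by_cases hk : k = i
  · exact Or.inr hk
  · left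
    simpa [List.getD, List.getElem?_set_ne (Ne.symm hk)] using h

theorem markFrom_inv (limit p : Int) (hp : 2 ≤ p) :
    ∀ (m : Int) (comp : List Bool), p < m → p ∣ m → SieveInv comp →
      SieveInv (markFrom limit p comp m) := by
  intro m comp
  induction comp, m using markFrom.induct (limit := limit) (p := p) with
  | case1 comp m h ih =>
    intro hpm hdvd hinv
    rw [markFrom, dif_pos h]
    refine ih (by omega) (dvd_add hdvd (dvd_refl p)) ?_
    intro k hk
    rcases getD_set_true hk with hold | hkm
    · exact hinv k hold
    · have hm0 : ((m.toNat : Int)) = m := Int.toNat_of_nonneg (by omega)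
      subst hkm
      rw [hm0]
      exact ⟨p, hp, hpm, hdvd⟩
  | case2 comp m h =>
    intro _ _ hinv
    rw [markFrom, dif_neg h]
    exact hinv

-- one step of A's loop is skippable when p is not the first divisor
theorem stdWhile_step (n p : Int) (hp : 2 ≤ p)
    (hnp : ¬(p * p ≤ n ∧ PySem.Int.mod n p = 0)) :
    stdWhile n p = stdWhile n (p + 1) := by
  by_cases hpp : p * p ≤ n
  · have hmod : PySem.Int.mod n p ≠ 0 := fun hm => hnp ⟨hpp, hm⟩
    rw [stdWhile, dif_pos hpp, if_neg hmod]
  · rw [stdWhile, dif_neg hpp]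
    rw [stdWhile, dif_neg (by nlinarith)]

-- The sieve scan agrees with A's trial-division loop, given that the limit bounds
-- sqrt(n) from above (tightly: limit*limit ≤ 4n) and nothing below p divides n
theorem sieveLoop_eq_stdWhile (n limit : Int) (hn : 2 ≤ n) (hl : 2 ≤ limit)
    (hub : n < limit * limit) (hlb : limit * limit ≤ 4 * n) :
    ∀ (p : Int) (comp : List Bool), 2 ≤ p → SieveInv comp →
      (∀ j : Int, 2 ≤ j → j < p → ¬(j * j ≤ n ∧ PySem.Int.mod n j = 0)) →
      sieveLoop n limit comp p = stdWhile n p := by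
  intro p comp
  induction comp, p using sieveLoop.induct (n := n) (limit := limit) with
  | case1 comp p h hunm hmod =>
    -- unmarked p, n % p == 0: B returns p; A returns p too, since p*p ≤ n must hold
    intro hp _ hprev
    have hdvd : p ∣ n := (PySem.Int.mod_eq_zero_iff_dvd n p).mp hmod
    have hpp : p * p ≤ n := by
      by_contra hgt
      push Not at hgt
      obtain ⟨q, hq⟩ := hdvd
      have hq1 : 1 ≤ q := by nlinarith
      rcases eq_or_lt_of_le hq1 with he | hq2
      · -- q = 1: n = p is prime, but then p ≥ limit, contradicting p < limit
        have hple : p + 1 ≤ limit := by omega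
        have hsq : (p + 1) * (p + 1) ≤ limit * limit :=
          mul_self_le_mul_self (by omega) hple
        have hnp : n = p := by rw [hq, ← he, mul_one]
        nlinarith
      · -- 2 ≤ q < p: q is an earlier divisor, contradicting hprev
        have hqp : q < p := by nlinarith
        exact hprev q (by omega) hqp
          ⟨by nlinarith, (PySem.Int.mod_eq_zero_iff_dvd n q).mpr ⟨p, by rw [hq]; ring⟩⟩
    rw [sieveLoop, dif_pos h, if_pos hunm, if_pos hmod]
    rw [stdWhile, dif_pos hpp, if_pos hmod]
  | case2 comp p h hunm hmod ih =>
    -- unmarked p, n % p ≠ 0: B marks p's multiples and moves on; A moves on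
    intro hp hinv hprev
    have hnp : ¬(p * p ≤ n ∧ PySem.Int.mod n p = 0) := fun hc => hmod hc.2
    have hprev' : ∀ j : Int, 2 ≤ j → j < p + 1 → ¬(j * j ≤ n ∧ PySem.Int.mod n j = 0) := by
      intro j h2 hj hc
      rcases lt_or_eq_of_le (show j ≤ p by omega) with hlt | heq
      · exact hprev j h2 hlt hc
      · exact hnp (heq ▸ hc)
    have hrec := ih (by omega)
      (markFrom_inv limit p hp (p * p) comp (by nlinarith) ⟨p, rfl⟩ hinv) hprev'
    rw [sieveLoop, dif_pos h, if_pos hunm, if_neg hmod, hrec, ← stdWhile_step n p hp hnp]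
  | case3 comp p h hmark ih =>
    -- marked p: p is composite, so p cannot be the first divisor; both move on
    intro hp hinv hprev
    have hcomp : ∃ d : Int, 2 ≤ d ∧ d < p ∧ d ∣ p := by
      have := hinv p.toNat (by simpa using hmark)
      rwa [Int.toNat_of_nonneg (by omega)] at this
    have hnp : ¬(p * p ≤ n ∧ PySem.Int.mod n p = 0) := by
      rintro ⟨hpp, hmod⟩
      obtain ⟨d, hd2, hdp, hdvd⟩ := hcomp
      refine hprev d hd2 hdp ⟨by nlinarith, ?_⟩
      rw [PySem.Int.mod_eq_zero_iff_dvd]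
      exact hdvd.trans ((PySem.Int.mod_eq_zero_iff_dvd n p).mp hmod)
    have hprev' : ∀ j : Int, 2 ≤ j → j < p + 1 → ¬(j * j ≤ n ∧ PySem.Int.mod n j = 0) := by
      intro j h2 hj hc
      rcases lt_or_eq_of_le (show j ≤ p by omega) with hlt | heq
      · exact hprev j h2 hlt hc
      · exact hnp (heq ▸ hc)
    rw [sieveLoop, dif_pos h, if_neg hmark, ih (by omega) hinv hprev',
        ← stdWhile_step n p hp hnp]
  | case4 comp p h =>
    -- p ≥ limit: no candidate with square ≤ n remains; both return 1
    intro hp _ _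
    have hlp : limit ≤ p := by omega
    have hsq : limit * limit ≤ p * p := mul_self_le_mul_self (by omega) hlp
    rw [sieveLoop, dif_neg h]
    rw [stdWhile, dif_neg (by omega)]

-- the doubling loop overshoots sqrt(n), but by at most a factor 2
theorem doubleLimit_spec (n : Int) : ∀ l : Int, 1 ≤ l →
    n < doubleLimit n l * doubleLimit n l ∧ l ≤ doubleLimit n l ∧
      (doubleLimit n l = l ∨ doubleLimit n l * doubleLimit n l ≤ 4 * n) := by
  intro l
  induction l using doubleLimit.induct (n := n) with
  | case1 l h ih =>
    intro _
    obtain ⟨h1, h2⟩ := h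
    obtain ⟨iha, ihb, ihc⟩ := ih (by omega)
    rw [doubleLimit, dif_pos ⟨h1, h2⟩]
    refine ⟨iha, by omega, Or.inr ?_⟩
    rcases ihc with he | hle
    · rw [he]; nlinarith
    · exact hle
  | case2 l h =>
    intro hl1
    rw [doubleLimit, dif_neg h]
    have hgt : ¬(l * l ≤ n) := fun hle => h ⟨hl1, hle⟩
    exact ⟨by omega, le_refl l, Or.inl rfl⟩

-- replicate false is honest (nothing is marked)
theorem sieveInv_replicate (k : Nat) : SieveInv (List.replicate k false) := by
  intro j hj
  simp [List.getD, List.getElem?_replicate] at hj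
  split at hj <;> simp_all

-- ===== VERDICT (by name: the statement is the Claim_ definition above) =====
theorem smallest_true_divisor_spec : Claim_equal_smallest_true_divisor := by
  intro n _
  unfold Spec_smallest_true_divisor smallest_true_divisor smallest_true_divisor_alt
  by_cases h2 : n < 2
  · rw [if_pos h2, if_pos h2]
  · rw [if_neg h2, if_neg h2]
    have hn : 2 ≤ n := by omega
    obtain ⟨hub, hge, hc⟩ := doubleLimit_spec n 1 le_rfl
    set limit := doubleLimit n 1 with hdef
    have hne1 : limit ≠ 1 := fun he => by rw [he] at hub; omega
    have hlb : limit * limit ≤ 4 * n := by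
      rcases hc with he | hle
      · exact absurd he hne1
      · exact hle
    have hl2 : 2 ≤ limit := by omega
    exact (sieveLoop_eq_stdWhile n limit hn hl2 hub hlb 2
      (List.replicate limit.toNat false) le_rfl (sieveInv_replicate _)
      (fun j hj2 hj hc => by omega)).symm
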